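-- pv_equiv track=rewrite | github.com/vllm-project/vllm | vllm/reasoning/olmo3_reasoning_parser.py | _check_string_overlap
-- ===== SOURCE A (Python) =====
-- def _check_string_overlap(s1: str, s2: str) -> bool:
--     # fast check; containing
--     if s1 in s2 or s2 in s1:
--         return True
--
--     # slower check that checks if there's any overlap between
--     # prefixes and suffixes
--     min_len = min(len(s1), len(s2))
--
--     # Check if s1 suffix matches s2 prefix
--     for i in range(1, min_len + 1):
--         if s1[-i:] == s2[:i]:
--             return True
--
--     # Check if s2 suffix matches s1 prefix
--     for i in range(1, min_len + 1):
--         if s2[-i:] == s1[:i]: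
--             return True
--
--     return False
-- ===== SOURCE B (Python) =====
-- def _check_string_overlap(s1: str, s2: str) -> bool:
--     # Single sliding-alignment scan: slide s1 across s2 and test whether the
--     # (nonempty) overlapping window matches; this covers containment and both
--     # suffix/prefix overlaps in one loop.
--     if not s1 or not s2:
--         return True
--     n1, n2 = len(s1), len(s2)
--     for d in range(1 - n1, n2):  # d = index of s1[0] relative to s2[0]
--         lo, hi = max(0, d), min(n2, d + n1)
--         if s1[lo - d:hi - d] == s2[lo:hi]:
--             return True
--     return False
-- ===== Notes on version B (the rewrite author's own statement) =====
-- stated objective: alternative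
-- what changed: Replaced A's three separate phases (two containment tests plus two quadratic suffix/prefix slice loops) by one sliding-alignment scan that slides s1 across s2 and tests whether the single nonempty overlapping window matches, covering containment and both overlap directions in one loop.
import Mathlib
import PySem

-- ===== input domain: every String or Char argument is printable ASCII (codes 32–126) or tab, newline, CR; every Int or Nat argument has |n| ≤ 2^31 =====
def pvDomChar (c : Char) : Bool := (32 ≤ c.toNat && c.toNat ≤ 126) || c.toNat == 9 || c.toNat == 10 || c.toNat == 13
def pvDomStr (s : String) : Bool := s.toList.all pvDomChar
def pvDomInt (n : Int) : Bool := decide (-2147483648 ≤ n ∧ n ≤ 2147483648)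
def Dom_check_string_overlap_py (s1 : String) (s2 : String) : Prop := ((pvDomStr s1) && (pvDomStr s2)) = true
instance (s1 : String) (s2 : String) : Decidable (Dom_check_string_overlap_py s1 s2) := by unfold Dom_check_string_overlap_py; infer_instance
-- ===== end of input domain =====

-- B replaces A's three phases (two containment tests plus two suffix/prefix slice loops) by one
-- sliding-alignment scan over all nonempty overlap windows; alternative structure, same worst-case cost.


-- ===== PORT A =====
def check_string_overlap_py (s1 : String) (s2 : String) : Bool :=
  -- fast check; containing
  if PySem.Str.isIn s1 s2 || PySem.Str.isIn s2 s1 then true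
  else
    -- slower check: any overlap between prefixes and suffixes
    let min_len : Int := min (PySem.Str.len s1) (PySem.Str.len s2)
    -- Check if s1 suffix matches s2 prefix
    if (PySem.List.pyRange 1 (min_len + 1) 1).any (fun i =>
         PySem.Str.slice s1 (some (-i)) none == PySem.Str.slice s2 none (some i)) then true
    -- Check if s2 suffix matches s1 prefix
    else if (PySem.List.pyRange 1 (min_len + 1) 1).any (fun i =>
         PySem.Str.slice s2 (some (-i)) none == PySem.Str.slice s1 none (some i)) then true
    else false

-- ===== PORT B =====
def check_string_overlap_py_alt (s1 : String) (s2 : String) : Bool :=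
  if PySem.Str.len s1 == 0 || PySem.Str.len s2 == 0 then true
  else
    let n1 : Int := PySem.Str.len s1
    let n2 : Int := PySem.Str.len s2
    (PySem.List.pyRange (1 - n1) n2 1).any (fun d =>
      let lo : Int := max 0 d
      let hi : Int := min n2 (d + n1)
      PySem.Str.slice s1 (some (lo - d)) (some (hi - d)) == PySem.Str.slice s2 (some lo) (some hi))

-- ===== PRECONDITION & SPEC =====
def Spec_check_string_overlap_py (s1 : String) (s2 : String) (out : Bool) : Prop := out = check_string_overlap_py_alt s1 s2
instance (s1 : String) (s2 : String) (out : Bool) : Decidable (Spec_check_string_overlap_py s1 s2 out) := by unfold Spec_check_string_overlap_py; infer_instance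

-- ===== CLAIM (what is proved, stated in full; the proofs are below) =====
def Claim_equal_check_string_overlap_py : Prop := ∀ (s1 : String) (s2 : String), Dom_check_string_overlap_py s1 s2 → Spec_check_string_overlap_py s1 s2 (check_string_overlap_py s1 s2)

-- ===== LEMMAS AND PROOFS =====

-- The window B compares at alignment d (index of s1[0] relative to s2[0]), on the list level.
def OvAt (l1 l2 : List Char) (d : Int) : Prop :=
  PySem.List.slice l1 (some (max 0 d - d)) (some (min (l2.length : Int) (d + l1.length) - d))
  = PySem.List.slice l2 (some (max 0 d)) (some (min (l2.length : Int) (d + l1.length)))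

-- alignment fully inside s2 ↔ s1 is a prefix of a tail of s2
theorem ovAt_inside (l1 l2 : List Char) (j : Nat) (h : (j : Int) + l1.length ≤ l2.length) :
    OvAt l1 l2 (j : Int) ↔ l1 <+: l2.drop j := by
  have hmax : max 0 (j : Int) = (j : Int) := by omega
  have hmin : min (l2.length : Int) ((j : Int) + l1.length) = (j : Int) + l1.length := by omega
  unfold OvAt
  rw [hmax, hmin]
  rw [PySem.List.slice_toNat l1 (by omega) (by omega),
      PySem.List.slice_toNat l2 (by omega) (by omega)]
  have e1 : ((j : Int) + l1.length - j).toNat = l1.length := by omega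
  have e2 : ((j : Int) - j).toNat = 0 := by omega
  have e3 : ((j : Int) + l1.length).toNat = j + l1.length := by omega
  have e4 : ((j : Int)).toNat = j := by omega
  rw [e1, e2, e3, e4]
  have e5 : j + l1.length - j = l1.length := by omega
  simp only [Nat.sub_zero, e5, List.drop_zero, List.take_length]
  rw [List.prefix_iff_eq_take]

-- alignment hanging off the left edge ↔ a suffix of s1 equals a prefix of s2
theorem ovAt_left (l1 l2 : List Char) (i : Nat) (h1 : 1 ≤ i) (hi1 : i ≤ l1.length)
    (hi2 : i ≤ l2.length) :
    OvAt l1 l2 ((i : Int) - l1.length) ↔ l1.drop (l1.length - i) = l2.take i := by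
  have hmax : max 0 ((i : Int) - l1.length) = 0 := by omega
  have hmin : min (l2.length : Int) ((i : Int) - l1.length + l1.length) = (i : Int) := by omega
  unfold OvAt
  rw [hmax, hmin]
  rw [PySem.List.slice_toNat l1 (by omega) (by omega),
      PySem.List.slice_toNat l2 (by omega) (by omega)]
  have e1 : ((0 : Int) - ((i : Int) - l1.length)).toNat = l1.length - i := by omega
  have e2 : ((i : Int) - ((i : Int) - l1.length)).toNat = l1.length := by omega
  have e3 : ((i : Int)).toNat = i := by omega
  rw [e1, e2, e3]
  have hfull : (l1.drop (l1.length - i)).take (l1.length - (l1.length - i)) = l1.drop (l1.length - i) := by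
    apply List.take_of_length_le; simp only [List.length_drop]; omega
  simp only [Int.toNat_zero, List.drop_zero, Nat.sub_zero, hfull]

-- alignment hanging off the right edge ↔ a prefix of s1 equals a suffix of s2
theorem ovAt_right (l1 l2 : List Char) (i : Nat) (h1 : 1 ≤ i) (hi1 : i ≤ l1.length)
    (hi2 : i ≤ l2.length) :
    OvAt l1 l2 ((l2.length : Int) - i) ↔ l1.take i = l2.drop (l2.length - i) := by
  have hmax : max 0 ((l2.length : Int) - i) = (l2.length : Int) - i := by omega
  have hmin : min (l2.length : Int) ((l2.length : Int) - i + l1.length) = (l2.length : Int) := by omega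
  unfold OvAt
  rw [hmax, hmin]
  rw [PySem.List.slice_toNat l1 (by omega) (by omega),
      PySem.List.slice_toNat l2 (by omega) (by omega)]
  have e1 : (((l2.length : Int) - i) - ((l2.length : Int) - i)).toNat = 0 := by omega
  have e2 : ((l2.length : Int) - ((l2.length : Int) - i)).toNat = i := by omega
  have e3 : ((l2.length : Int)).toNat = l2.length := by omega
  have e4 : (((l2.length : Int) - i)).toNat = l2.length - i := by omega
  rw [e1, e2, e3, e4]
  have hfull : (l2.drop (l2.length - i)).take (l2.length - (l2.length - i)) = l2.drop (l2.length - i) := by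
    apply List.take_of_length_le; simp only [List.length_drop]; omega
  simp only [List.drop_zero, Nat.sub_zero, hfull]

-- alignment hanging off both edges ↔ s2 is a prefix of a tail of s1
theorem ovAt_outside (l1 l2 : List Char) (j : Nat) (h : (j : Int) + l2.length ≤ l1.length) :
    OvAt l1 l2 (-(j : Int)) ↔ l2 <+: l1.drop j := by
  have hmax : max 0 (-(j : Int)) = 0 := by omega
  have hmin : min (l2.length : Int) (-(j : Int) + l1.length) = (l2.length : Int) := by omega
  unfold OvAt
  rw [hmax, hmin]
  rw [PySem.List.slice_toNat l1 (by omega) (by omega),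
      PySem.List.slice_toNat l2 (by omega) (by omega)]
  have e1 : ((0 : Int) - -(j : Int)).toNat = j := by omega
  have e2 : (((l2.length : Int)) - -(j : Int)).toNat = l2.length + j := by omega
  have e3 : ((l2.length : Int)).toNat = l2.length := by omega
  rw [e1, e2, e3]
  have e5 : l2.length + j - j = l2.length := by omega
  simp only [Int.toNat_zero, List.drop_zero, Nat.sub_zero, e5, List.take_length]
  rw [List.prefix_iff_eq_take]
  exact eq_comm

-- bridge: B's existential over alignments ↔ A's four-way disjunction (both strings nonempty)
theorem main_bridge (l1 l2 : List Char) (h1 : l1 ≠ []) (h2 : l2 ≠ []) :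
    (∃ d : Int, 1 - l1.length ≤ d ∧ d < l2.length ∧ OvAt l1 l2 d) ↔
      (l1 <:+: l2 ∨ l2 <:+: l1 ∨
       (∃ i : Nat, 1 ≤ i ∧ i ≤ l1.length ∧ i ≤ l2.length ∧ l1.drop (l1.length - i) = l2.take i) ∨
       (∃ i : Nat, 1 ≤ i ∧ i ≤ l2.length ∧ i ≤ l1.length ∧ l2.drop (l2.length - i) = l1.take i)) := by
  have hn1 : 0 < l1.length := List.length_pos_iff.mpr h1
  have hn2 : 0 < l2.length := List.length_pos_iff.mpr h2
  constructor
  · rintro ⟨d, hlo, hhi, hov⟩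
    by_cases h0 : 0 ≤ d <;> by_cases hle : d + l1.length ≤ (l2.length : Int)
    · -- fully inside s2: containment s1 in s2
      left
      rw [← (PySem.Chars.isIn_iff_infix l1 l2), ← PySem.Chars.exists_prefix_drop_iff_isIn]
      refine ⟨d.toNat, ?_⟩
      have hd : d = (d.toNat : Int) := by omega
      rw [hd] at hov
      exact (ovAt_inside l1 l2 d.toNat (by omega)).mp hov
    · -- hangs off the right edge
      right; right; right
      refine ⟨((l2.length : Int) - d).toNat, by omega, by omega, by omega, ?_⟩
      have hd : d = (l2.length : Int) - (((l2.length : Int) - d).toNat : Int) := by omega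
      rw [hd] at hov
      exact ((ovAt_right l1 l2 _ (by omega) (by omega) (by omega)).mp hov).symm
    · -- hangs off the left edge
      right; right; left
      refine ⟨(d + l1.length).toNat, by omega, by omega, by omega, ?_⟩
      have hd : d = ((((d + l1.length).toNat) : Int) - l1.length) := by omega
      rw [hd] at hov
      exact (ovAt_left l1 l2 _ (by omega) (by omega) (by omega)).mp hov
    · -- hangs off both edges: containment s2 in s1
      right; left
      rw [← (PySem.Chars.isIn_iff_infix l2 l1), ← PySem.Chars.exists_prefix_drop_iff_isIn]
      refine ⟨(-d).toNat, ?_⟩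
      have hd : d = -(((-d).toNat : Int)) := by omega
      rw [hd] at hov
      exact (ovAt_outside l1 l2 _ (by omega)).mp hov
  · rintro (hc | hc | ⟨i, hi1, hi2, hi3, he⟩ | ⟨i, hi1, hi2, hi3, he⟩)
    · obtain ⟨j, hpre⟩ := (PySem.Chars.exists_prefix_drop_iff_isIn l1 l2).mpr
        ((PySem.Chars.isIn_iff_infix l1 l2).mpr hc)
      have hlen : l1.length ≤ (l2.drop j).length := List.IsPrefix.length_le hpre
      simp only [List.length_drop] at hlen
      have hj : j ≤ l2.length - l1.length := by omega
      refine ⟨(j : Int), by omega, by omega, ?_⟩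
      exact (ovAt_inside l1 l2 j (by omega)).mpr hpre
    · obtain ⟨j, hpre⟩ := (PySem.Chars.exists_prefix_drop_iff_isIn l2 l1).mpr
        ((PySem.Chars.isIn_iff_infix l2 l1).mpr hc)
      have hlen : l2.length ≤ (l1.drop j).length := List.IsPrefix.length_le hpre
      simp only [List.length_drop] at hlen
      refine ⟨-(j : Int), by omega, by omega, ?_⟩
      exact (ovAt_outside l1 l2 j (by omega)).mpr hpre
    · exact ⟨(i : Int) - l1.length, by omega, by omega,
        (ovAt_left l1 l2 i hi1 hi2 hi3).mpr he⟩
    · exact ⟨(l2.length : Int) - i, by omega, by omega,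
        (ovAt_right l1 l2 i hi1 hi3 hi2).mpr he.symm⟩


-- A's suffix/prefix loop, turned into a Nat existential
theorem loop_iff (s t : String) :
    ((PySem.List.pyRange 1 (min (PySem.Str.len s) (PySem.Str.len t) + 1) 1).any (fun i =>
        PySem.Str.slice s (some (-i)) none == PySem.Str.slice t none (some i))) = true ↔
    ∃ k : Nat, 1 ≤ k ∧ k ≤ s.toList.length ∧ k ≤ t.toList.length ∧
      s.toList.drop (s.toList.length - k) = t.toList.take k := by
  rw [List.any_eq_true]
  constructor
  · rintro ⟨x, hx, hb⟩
    rw [PySem.List.mem_pyRange_one] at hx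
    rw [PySem.Str.len_eq, PySem.Str.len_eq] at hx
    have hx1 : (1 : Int) ≤ x := hx.1
    have hx2 : x ≤ min (s.toList.length : Int) (t.toList.length : Int) := by omega
    refine ⟨x.toNat, by omega, by omega, by omega, ?_⟩
    rw [beq_iff_eq, ← String.toList_inj] at hb
    rw [PySem.Str.toList_slice, PySem.Str.toList_slice,
        PySem.Chars.slice_eq_listSlice, PySem.Chars.slice_eq_listSlice] at hb
    have hxe : -x = -((x.toNat : Nat) : Int) := by omega
    rw [hxe, PySem.List.slice_some_none,
        PySem.List.clampIdx_neg_natCast _ _ (by omega),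
        PySem.List.slice_to _ (by omega)] at hb
    simpa using hb
  · rintro ⟨k, hk1, hk2, hk3, he⟩
    refine ⟨(k : Int), ?_, ?_⟩
    · rw [PySem.List.mem_pyRange_one, PySem.Str.len_eq, PySem.Str.len_eq]; omega
    · rw [beq_iff_eq, ← String.toList_inj]
      rw [PySem.Str.toList_slice, PySem.Str.toList_slice,
          PySem.Chars.slice_eq_listSlice, PySem.Chars.slice_eq_listSlice]
      rw [PySem.List.slice_some_none,
          PySem.List.clampIdx_neg_natCast _ _ (by omega),
          PySem.List.slice_to _ (by omega)]
      simpa using he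

-- port A, characterised
theorem A_iff (s1 s2 : String) :
    check_string_overlap_py s1 s2 = true ↔
      (s1.toList <:+: s2.toList ∨ s2.toList <:+: s1.toList ∨
       (∃ k : Nat, 1 ≤ k ∧ k ≤ s1.toList.length ∧ k ≤ s2.toList.length ∧
          s1.toList.drop (s1.toList.length - k) = s2.toList.take k) ∨
       (∃ k : Nat, 1 ≤ k ∧ k ≤ s2.toList.length ∧ k ≤ s1.toList.length ∧
          s2.toList.drop (s2.toList.length - k) = s1.toList.take k)) := by
  simp only [check_string_overlap_py]
  split_ifs with h1 h2 h3
  · rw [Bool.or_eq_true, PySem.Str.isIn_iff_infix, PySem.Str.isIn_iff_infix] at h1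
    simp only [true_iff]
    tauto
  · rw [loop_iff s1 s2] at h2
    simp only [true_iff]
    exact Or.inr (Or.inr (Or.inl h2))
  · rw [min_comm] at h3
    rw [loop_iff s2 s1] at h3
    simp only [true_iff]
    exact Or.inr (Or.inr (Or.inr h3))
  · rw [Bool.or_eq_true, PySem.Str.isIn_iff_infix, PySem.Str.isIn_iff_infix] at h1
    rw [loop_iff s1 s2] at h2
    rw [min_comm] at h3
    rw [loop_iff s2 s1] at h3
    simp only [false_iff]
    rintro (hc | hc | hc | hc)
    · exact h1 (Or.inl hc)
    · exact h1 (Or.inr hc)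
    · exact h2 hc
    · exact h3 hc

-- port B, characterised
theorem B_iff (s1 s2 : String) :
    check_string_overlap_py_alt s1 s2 = true ↔
      s1.toList = [] ∨ s2.toList = [] ∨
      ∃ d : Int, 1 - s1.toList.length ≤ d ∧ d < s2.toList.length ∧ OvAt s1.toList s2.toList d := by
  unfold check_string_overlap_py_alt
  split_ifs with h
  · rw [Bool.or_eq_true, beq_iff_eq, beq_iff_eq, PySem.Str.len_eq, PySem.Str.len_eq] at h
    simp only [true_iff]
    rcases h with h | h
    · left; rw [← List.length_eq_zero_iff]; omega
    · right; left; rw [← List.length_eq_zero_iff]; omega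
  · rw [Bool.or_eq_true, beq_iff_eq, beq_iff_eq, PySem.Str.len_eq, PySem.Str.len_eq] at h
    rw [not_or] at h
    have e1 : s1.toList ≠ [] := by
      intro e; exact h.1 (by rw [e]; simp)
    have e2 : s2.toList ≠ [] := by
      intro e; exact h.2 (by rw [e]; simp)
    rw [List.any_eq_true]
    constructor
    · rintro ⟨d, hd, hb⟩
      rw [PySem.List.mem_pyRange_one, PySem.Str.len_eq, PySem.Str.len_eq] at hd
      refine Or.inr (Or.inr ⟨d, by omega, by omega, ?_⟩)
      rw [beq_iff_eq, ← String.toList_inj] at hb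
      rw [PySem.Str.toList_slice, PySem.Str.toList_slice,
          PySem.Chars.slice_eq_listSlice, PySem.Chars.slice_eq_listSlice,
          PySem.Str.len_eq, PySem.Str.len_eq] at hb
      exact hb
    · rintro (h' | h' | ⟨d, hd1, hd2, hov⟩)
      · exact absurd h' e1
      · exact absurd h' e2
      · refine ⟨d, ?_, ?_⟩
        · rw [PySem.List.mem_pyRange_one, PySem.Str.len_eq, PySem.Str.len_eq]; omega
        · rw [beq_iff_eq, ← String.toList_inj]
          rw [PySem.Str.toList_slice, PySem.Str.toList_slice,
              PySem.Chars.slice_eq_listSlice, PySem.Chars.slice_eq_listSlice,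
              PySem.Str.len_eq, PySem.Str.len_eq]
          exact hov

-- ===== VERDICT (by name: the statement is the Claim_ definition above) =====
theorem check_string_overlap_py_spec : Claim_equal_check_string_overlap_py := by
  intro s1 s2 _
  unfold Spec_check_string_overlap_py
  rw [Bool.eq_iff_iff, A_iff, B_iff]
  by_cases e1 : s1.toList = []
  · simp [e1, List.nil_infix]
  by_cases e2 : s2.toList = []
  · simp [e1, e2, List.nil_infix]
  · rw [main_bridge _ _ e1 e2]
    simp [e1, e2]
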